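-- pv_equiv track=rewrite | github.com/Planning-Inspectorate/odw-synapse-workspace | odw/test/unit_test/etl/harmonised/test_nsip_project_harmonisation_process.py | _default_first_seen_rows
-- ===== SOURCE A (Python) =====
-- def _default_first_seen_rows(service_bus_rows):
--     grouped = {}
--
--     for row in service_bus_rows:
--         case_id = row.get("caseId")
--         ingestion = row.get("IngestionDate")
--         if case_id is None or ingestion is None:
--             continue
--
--         if case_id not in grouped or ingestion < grouped[case_id]:
--             grouped[case_id] = ingestion
--
--     return [(case_id, ingested) for case_id, ingested in grouped.items()]
-- ===== SOURCE B (Python) =====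
-- def _default_first_seen_rows(service_bus_rows):
--     # Pass 1: group all IngestionDate values per caseId (insertion order = first occurrence).
--     groups = {}
--     for row in service_bus_rows:
--         case_id = row.get("caseId")
--         ingestion = row.get("IngestionDate")
--         if case_id is None or ingestion is None:
--             continue
--         groups.setdefault(case_id, []).append(ingestion)
--     # Pass 2: aggregate each group with min().
--     return [(case_id, min(dates)) for case_id, dates in groups.items()]
-- ===== Notes on version B (the rewrite author's own statement) =====
-- stated objective: alternative
-- what changed: B separates the work into two passes - first grouping every IngestionDate into a per-caseId list, then aggregating each group with min() - instead of A's single pass that maintains a running minimum inline.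
import Mathlib
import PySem

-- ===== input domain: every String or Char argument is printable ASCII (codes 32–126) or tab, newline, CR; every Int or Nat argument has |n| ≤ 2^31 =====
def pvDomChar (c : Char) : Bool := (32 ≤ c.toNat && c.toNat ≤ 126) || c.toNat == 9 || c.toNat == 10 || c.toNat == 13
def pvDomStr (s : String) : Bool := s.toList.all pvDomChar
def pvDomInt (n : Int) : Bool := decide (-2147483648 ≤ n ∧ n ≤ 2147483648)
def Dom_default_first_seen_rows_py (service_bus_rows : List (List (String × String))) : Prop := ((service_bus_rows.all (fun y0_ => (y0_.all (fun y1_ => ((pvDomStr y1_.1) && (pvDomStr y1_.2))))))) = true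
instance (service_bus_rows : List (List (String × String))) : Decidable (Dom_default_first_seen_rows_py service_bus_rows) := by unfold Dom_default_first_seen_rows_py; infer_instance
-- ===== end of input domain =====

-- B keeps the same single scan of the rows but two phases: group-then-min instead of A's inline running minimum.

-- ===== PORT A =====
-- one pass keeping the running minimum per caseId
def default_first_seen_rows_py (service_bus_rows : List (List (String × String))) : List (String × String) :=
  let grouped := service_bus_rows.foldl (fun (g : PySem.Dict String String) row =>
    match (PySem.Dict.mk row).get? "caseId", (PySem.Dict.mk row).get? "IngestionDate" with
    | some case_id, some ingestion =>
        if (!g.contains case_id || decide (ingestion < g.getD case_id "")) then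
          g.insert case_id ingestion
        else g
    | _, _ => g) PySem.Dict.empty
  grouped.items

-- ===== PORT B =====
-- pass 1: collect every IngestionDate per caseId; pass 2: min of each group
def default_first_seen_rows_py_alt (service_bus_rows : List (List (String × String))) : List (String × String) :=
  let groups := service_bus_rows.foldl (fun (g : PySem.Dict String (List String)) row =>
    match (PySem.Dict.mk row).get? "caseId" with
    | none => g      -- caseId missing: skip the row
    | some case_id =>
      match (PySem.Dict.mk row).get? "IngestionDate" with
      | none => g    -- IngestionDate missing: skip the row
      | some ingestion => g.modify case_id [] (· ++ [ingestion])) PySem.Dict.empty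
  groups.items.map (fun p => (p.1, (PySem.List.min? p.2 (fun x => x)).getD ""))  -- groups are never empty, the "" default is unreachable

-- ===== PRECONDITION & SPEC =====
def Spec_default_first_seen_rows_py (service_bus_rows : List (List (String × String))) (out : List (String × String)) : Prop := out = default_first_seen_rows_py_alt service_bus_rows
instance (service_bus_rows : List (List (String × String))) (out : List (String × String)) : Decidable (Spec_default_first_seen_rows_py service_bus_rows out) := by unfold Spec_default_first_seen_rows_py; infer_instance

-- ===== CLAIM (what is proved, stated in full; the proofs are below) =====
def Claim_equal_default_first_seen_rows_py : Prop := ∀ (service_bus_rows : List (List (String × String))), Dom_default_first_seen_rows_py service_bus_rows → Spec_default_first_seen_rows_py service_bus_rows (default_first_seen_rows_py service_bus_rows)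

-- ===== LEMMAS AND PROOFS =====

-- the two loop bodies
def pvStepA (g : PySem.Dict String String) (row : List (String × String)) : PySem.Dict String String :=
  match (PySem.Dict.mk row).get? "caseId", (PySem.Dict.mk row).get? "IngestionDate" with
  | some case_id, some ingestion =>
      if (!g.contains case_id || decide (ingestion < g.getD case_id "")) then
        g.insert case_id ingestion
      else g
  | _, _ => g

def pvStepB (g : PySem.Dict String (List String)) (row : List (String × String)) : PySem.Dict String (List String) :=
  match (PySem.Dict.mk row).get? "caseId" with
  | none => g
  | some case_id =>
    match (PySem.Dict.mk row).get? "IngestionDate" with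
    | none => g
    | some ingestion => g.modify case_id [] (· ++ [ingestion])

def pvMin (v : List String) : String := (PySem.List.min? v (fun x => x)).getD ""

-- the coupling invariant between A's dict and B's dict
def pvRel (dA : PySem.Dict String String) (dB : PySem.Dict String (List String)) : Prop :=
  dA.items = dB.items.map (fun p => (p.1, pvMin p.2)) ∧
  dB.keys.Nodup ∧ (∀ p ∈ dB.items, p.2 ≠ [])

theorem pvMin_append (v : List String) (hv : v ≠ []) (i : String) :
    pvMin (v ++ [i]) = if i < pvMin v then i else pvMin v := by
  obtain ⟨x, t, rfl⟩ := List.exists_cons_of_ne_nil hv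
  simp only [pvMin, List.cons_append, PySem.List.min?_id_cons, List.foldl_append, List.foldl_cons,
    List.foldl_nil, Option.getD_some]
  rw [min_def]
  split_ifs with h1 h2 h2 <;>
    first | rfl | exact absurd h2 (not_lt.mpr h1) | exact absurd (le_of_not_gt h2) (fun h => h1 h)

theorem pvRel_step (dA : PySem.Dict String String) (dB : PySem.Dict String (List String))
    (h : pvRel dA dB) (row : List (String × String)) :
    pvRel (pvStepA dA row) (pvStepB dB row) := by
  obtain ⟨hitems, hnd, hne⟩ := h
  have hkeys : dA.keys = dB.keys := by
    simp only [PySem.Dict.keys, hitems, List.map_map]; rfl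
  have hAnd : dA.keys.Nodup := hkeys ▸ hnd
  unfold pvStepA pvStepB
  cases hc : (PySem.Dict.mk row).get? "caseId" with
  | none => cases (PySem.Dict.mk row).get? "IngestionDate" <;> exact ⟨hitems, hnd, hne⟩
  | some cid =>
  cases hi : (PySem.Dict.mk row).get? "IngestionDate" with
  | none => exact ⟨hitems, hnd, hne⟩
  | some ing =>
  simp only
  have hcont : dA.contains cid = dB.contains cid := by
    rw [PySem.Dict.contains_eq_decide_mem_keys, PySem.Dict.contains_eq_decide_mem_keys, hkeys]
  have hmodins : dB.modify cid [] (· ++ [ing]) = dB.insert cid (dB.getD cid [] ++ [ing]) := rfl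
  by_cases hm : dB.contains cid = true
  · -- key already present in both dicts
    have hmem : cid ∈ dB.keys := (PySem.Dict.contains_iff_mem_keys dB cid).mp hm
    obtain ⟨p0, hp0, hp0c⟩ := List.mem_map.mp hmem
    obtain ⟨v, hv⟩ : ∃ v, (cid, v) ∈ dB.items := ⟨p0.2, by rwa [show (cid, p0.2) = p0 from by rw [← hp0c]]⟩
    have hvne := hne _ hv
    have hgB : dB.getD cid [] = v := PySem.Dict.getD_of_mem_items dB hv hnd []
    have hAmem : (cid, pvMin v) ∈ dA.items := by
      rw [hitems]; exact List.mem_map.mpr ⟨(cid, v), hv, rfl⟩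
    have hgA : dA.getD cid "" = pvMin v := PySem.Dict.getD_of_mem_items dA hAmem hAnd ""
    have hmA : dA.contains cid = true := hcont.trans hm
    rw [hmA, hgA, hmodins, hgB]
    have hnodB : (dB.insert cid (v ++ [ing])).keys.Nodup := PySem.Dict.nodup_keys_insert _ _ _ hnd
    have hneB : ∀ p ∈ (dB.insert cid (v ++ [ing])).items, p.2 ≠ [] := by
      intro p hp
      rcases (PySem.Dict.mem_items_insert _ _ _ _).mp hp with hpe | ⟨hpm, _⟩
      · rw [hpe]; simp
      · exact hne _ hpm
    have huniq : ∀ p ∈ dB.items, p.1 = cid → p.2 = v := by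
      intro p hp hpc
      have h1 : dB.get? cid = some v := PySem.Dict.get?_of_mem_items dB hv hnd
      have h2 : dB.get? p.1 = some p.2 := PySem.Dict.get?_of_mem_items dB (by simpa using hp) hnd
      rw [hpc, h1] at h2
      exact (Option.some.inj h2).symm
    by_cases hlt : ing < pvMin v
    · -- strict improvement: both dicts replace the entry at cid
      simp only [Bool.not_true, Bool.false_or, hlt, decide_true, if_true]
      refine ⟨?_, hnodB, hneB⟩
      rw [PySem.Dict.items_insert_of_contains dA ing hmA, PySem.Dict.items_insert_of_contains dB (v ++ [ing]) hm,
        hitems, List.map_map, List.map_map]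
      refine List.map_congr_left (fun p hp => ?_)
      by_cases hpc : p.1 = cid
      · have hpv : p.2 = v := huniq p hp hpc
        simp [Function.comp, hpc, pvMin_append v hvne ing, hlt]
      · simp [Function.comp, hpc]
    · -- no improvement: A keeps its entry, B appends but the minimum is unchanged
      simp only [Bool.not_true, Bool.false_or, hlt, decide_false, Bool.false_eq_true, if_false]
      refine ⟨?_, hnodB, hneB⟩
      rw [PySem.Dict.items_insert_of_contains dB (v ++ [ing]) hm, hitems, List.map_map]
      refine (List.map_congr_left (fun p hp => ?_)).symm
      by_cases hpc : p.1 = cid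
      · have hpv : p.2 = v := huniq p hp hpc
        simp [Function.comp, hpc, hpv, pvMin_append v hvne ing, hlt]
      · simp [Function.comp, hpc]
  · -- fresh key: both dicts append a new entry
    have hm' : dB.contains cid = false := by simpa using hm
    have hmA : dA.contains cid = false := hcont.trans hm'
    have hgB : dB.getD cid [] = [] := PySem.Dict.getD_of_not_contains dB [] hm'
    rw [hmA, hmodins, hgB]
    simp only [Bool.not_false, Bool.true_or, if_true, List.nil_append]
    refine ⟨?_, PySem.Dict.nodup_keys_insert _ _ _ hnd, ?_⟩
    · rw [PySem.Dict.items_insert_of_not_contains dA ing hmA,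
        PySem.Dict.items_insert_of_not_contains dB [ing] hm', hitems, List.map_append]
      simp [pvMin, PySem.List.min?_id_cons]
    · intro p hp
      rcases (PySem.Dict.mem_items_insert _ _ _ _).mp hp with hpe | ⟨hpm, _⟩
      · rw [hpe]; simp
      · exact hne _ hpm

theorem pvRel_foldl (rows : List (List (String × String)))
    (dA : PySem.Dict String String) (dB : PySem.Dict String (List String))
    (h : pvRel dA dB) : pvRel (rows.foldl pvStepA dA) (rows.foldl pvStepB dB) := by
  induction rows generalizing dA dB with
  | nil => exact h
  | cons r t ih => exact ih _ _ (pvRel_step _ _ h r)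

-- ===== VERDICT (by name: the statement is the Claim_ definition above) =====
theorem default_first_seen_rows_py_spec : Claim_equal_default_first_seen_rows_py := by
  intro rows _
  unfold Spec_default_first_seen_rows_py default_first_seen_rows_py default_first_seen_rows_py_alt
  have h := pvRel_foldl rows PySem.Dict.empty PySem.Dict.empty
    ⟨rfl, by simp, by simp [PySem.Dict.empty]⟩
  exact h.1
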